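-- pv_equiv track=rewrite | github.com/ancienty490/stunning-fiesta | main.py | _classify_prompt_type
-- ===== SOURCE A (Python) =====
-- def _classify_prompt_type(prompt):
--     """Classify prompt type for better analysis"""
--     prompt_lower = prompt.lower()
--
--     if any(word in prompt_lower for word in ['help', 'problem', 'not working', 'error', 'issue']):
--         return "troubleshooting"
--     elif any(word in prompt_lower for word in ['draw', 'sketch', 'paint', 'create']):
--         return "drawing_instruction"
--     elif any(word in prompt_lower for word in ['color', 'palette', 'shade']):
--         return "color_guidance"
--     elif any(word in prompt_lower for word in ['tutorial', 'how to', 'guide']):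
--         return "educational"
--     else:
--         return "general"
-- ===== SOURCE B (Python) =====
-- # B: flat (keyword, priority-rank) list; one min-fold over all keywords, then index a name table.
-- _KEYWORD_RANKS = (
--     [(w, 0) for w in ['help', 'problem', 'not working', 'error', 'issue']]
--     + [(w, 1) for w in ['draw', 'sketch', 'paint', 'create']]
--     + [(w, 2) for w in ['color', 'palette', 'shade']]
--     + [(w, 3) for w in ['tutorial', 'how to', 'guide']]
-- )
-- _NAMES = ["troubleshooting", "drawing_instruction", "color_guidance", "educational", "general"]
--
-- def _classify_prompt_type(prompt):
--     """Classify prompt type for better analysis"""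
--     prompt_lower = prompt.lower()
--     best = 4
--     for word, rank in _KEYWORD_RANKS:
--         if word in prompt_lower:
--             best = min(best, rank)
--     return _NAMES[best]
-- ===== Notes on version B (the rewrite author's own statement) =====
-- stated objective: alternative
-- what changed: Replaces the short-circuiting if/elif chain of any() tests with a single min-fold over a flat keyword->priority list (the minimum rank among matched keywords selects the name from a table).
import Mathlib
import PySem

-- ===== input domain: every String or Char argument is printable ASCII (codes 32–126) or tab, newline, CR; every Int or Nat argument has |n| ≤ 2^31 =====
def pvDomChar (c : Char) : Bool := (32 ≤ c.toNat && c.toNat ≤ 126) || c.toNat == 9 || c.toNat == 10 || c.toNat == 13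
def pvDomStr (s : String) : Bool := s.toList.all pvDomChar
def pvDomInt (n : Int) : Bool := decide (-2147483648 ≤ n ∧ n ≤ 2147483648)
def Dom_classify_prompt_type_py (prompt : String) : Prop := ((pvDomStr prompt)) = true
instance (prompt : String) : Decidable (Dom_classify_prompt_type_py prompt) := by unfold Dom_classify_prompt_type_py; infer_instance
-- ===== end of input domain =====

-- B replaces A's short-circuit if/elif chain with a min-fold over a flat keyword→rank list plus a name table (alternative, same cost).

-- ===== PORT A =====
def classify_prompt_type_py (prompt : String) : String :=
  let prompt_lower := PySem.Str.lower prompt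
  if ["help", "problem", "not working", "error", "issue"].any (fun word => PySem.Str.isIn word prompt_lower) then
    "troubleshooting"
  else if ["draw", "sketch", "paint", "create"].any (fun word => PySem.Str.isIn word prompt_lower) then
    "drawing_instruction"
  else if ["color", "palette", "shade"].any (fun word => PySem.Str.isIn word prompt_lower) then
    "color_guidance"
  else if ["tutorial", "how to", "guide"].any (fun word => PySem.Str.isIn word prompt_lower) then
    "educational"
  else
    "general"

-- ===== PORT B =====
def pvKeywordRanks : List (String × Nat) :=
  (["help", "problem", "not working", "error", "issue"].map (fun w => (w, 0)))
  ++ (["draw", "sketch", "paint", "create"].map (fun w => (w, 1)))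
  ++ (["color", "palette", "shade"].map (fun w => (w, 2)))
  ++ (["tutorial", "how to", "guide"].map (fun w => (w, 3)))

def pvNames : List String := ["troubleshooting", "drawing_instruction", "color_guidance", "educational", "general"]

-- _NAMES[best]: best is always ≤ 4, so the Python index never raises; getD "" is never the result.
def classify_prompt_type_py_alt (prompt : String) : String :=
  let prompt_lower := PySem.Str.lower prompt
  let best := pvKeywordRanks.foldl
    (fun best kr => if PySem.Str.isIn kr.1 prompt_lower then min best kr.2 else best) 4
  pvNames[best]?.getD ""

-- ===== PRECONDITION & SPEC =====
def Spec_classify_prompt_type_py (prompt : String) (out : String) : Prop := out = classify_prompt_type_py_alt prompt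
instance (prompt : String) (out : String) : Decidable (Spec_classify_prompt_type_py prompt out) := by unfold Spec_classify_prompt_type_py; infer_instance

-- ===== CLAIM (what is proved, stated in full; the proofs are below) =====
def Claim_equal_classify_prompt_type_py : Prop := ∀ (prompt : String), Dom_classify_prompt_type_py prompt → Spec_classify_prompt_type_py prompt (classify_prompt_type_py prompt)

-- ===== LEMMAS AND PROOFS =====

-- Folding the min-update over a uniform-rank group either lowers best to r (some keyword matched) or leaves it.
theorem pv_foldl_min_group (p : String) (r : Nat) (ws : List String) (b : Nat) :
    ((ws.map (fun w => (w, r))).foldl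
      (fun best kr => if PySem.Str.isIn kr.1 p then min best kr.2 else best) b)
    = if ws.any (fun w => PySem.Str.isIn w p) then min b r else b := by
  induction ws generalizing b with
  | nil => rfl
  | cons w ws ih =>
    simp only [List.map_cons, List.foldl_cons]
    by_cases h : PySem.Str.isIn w p = true
    · rw [if_pos h, ih, List.any_cons, h, Bool.true_or]
      simp only [Nat.min_def]; split_ifs <;> omega
    · rw [Bool.not_eq_true] at h
      rw [h, if_neg (by simp), ih, List.any_cons, h, Bool.false_or]

-- ===== VERDICT (by name: the statement is the Claim_ definition above) =====
theorem classify_prompt_type_py_spec : Claim_equal_classify_prompt_type_py := by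
  intro prompt _
  unfold Spec_classify_prompt_type_py classify_prompt_type_py classify_prompt_type_py_alt pvKeywordRanks pvNames
  simp only [List.foldl_append, pv_foldl_min_group]
  generalize (["help", "problem", "not working", "error", "issue"].any
      (fun word => PySem.Str.isIn word (PySem.Str.lower prompt))) = b1
  generalize (["draw", "sketch", "paint", "create"].any
      (fun word => PySem.Str.isIn word (PySem.Str.lower prompt))) = b2
  generalize (["color", "palette", "shade"].any
      (fun word => PySem.Str.isIn word (PySem.Str.lower prompt))) = b3
  generalize (["tutorial", "how to", "guide"].any
      (fun word => PySem.Str.isIn word (PySem.Str.lower prompt))) = b4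
  cases b1 <;> cases b2 <;> cases b3 <;> cases b4 <;> rfl
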